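-- pv_equiv track=rewrite | github.com/gwtak/Plant-Image-Recognition | test.py | get_label_name
-- ===== SOURCE A (Python) =====
-- def get_label_name(path):
--     # 标签左开头
--     left = len(path) - 1
--     # 标签右结尾
--     right = len(path) - 1
--     # 是否已遍历过’/‘
--     flag = 1
--     # 从后往前遍历字符串
--     for i in range(len(path) - 1, -1, -1):
--         # 是否是‘/’
--         if (path[i] == '\\'):
--             # 未遍历过’/‘
--             if (flag):
--                 # 标签右结尾
--                 right = i
--                 flag = 0
--             # 遍历过’/‘
--             else:
--                 # 标签左开头
--                 left = i + 1
--                 break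
--     # 返回标签名字
--     return path[left:right]
-- ===== SOURCE B (Python) =====
-- def get_label_name(path):
--     # forward single pass: `last` accumulates the characters since the most
--     # recent backslash (None until one is seen); at each backslash the previous
--     # segment becomes `between`, so at the end `between` is the text between
--     # the last two backslashes.
--     between = None
--     last = None
--     for ch in path:
--         if ch == '\\':
--             if last is not None:
--                 between = last
--             last = ''
--         else:
--             if last is not None:
--                 last = last + ch
--     return between if between is not None else ''
-- ===== Notes on version B (the rewrite author's own statement) =====
-- stated objective: alternative
-- what changed: Replaces A's backward index scan with flag/break and final slice by a forward single pass that accumulates the segment since the most recent backslash and promotes it to the answer at each backslash, never using indices or slicing.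
import Mathlib
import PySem

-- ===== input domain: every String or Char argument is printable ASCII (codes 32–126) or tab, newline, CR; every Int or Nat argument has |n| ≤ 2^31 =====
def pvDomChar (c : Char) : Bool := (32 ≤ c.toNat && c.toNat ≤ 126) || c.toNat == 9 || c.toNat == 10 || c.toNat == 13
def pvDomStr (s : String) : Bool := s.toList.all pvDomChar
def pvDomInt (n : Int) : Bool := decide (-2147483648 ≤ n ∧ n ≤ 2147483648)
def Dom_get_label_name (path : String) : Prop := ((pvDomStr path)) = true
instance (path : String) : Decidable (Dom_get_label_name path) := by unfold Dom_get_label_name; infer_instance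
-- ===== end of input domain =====

-- B replaces A's backward index scan (flag/break + slice) by a forward single-pass
-- accumulator that carries the segment since the most recent backslash (alternative).


-- ===== PORT A =====
-- A's loop 'for i in range(len(path)-1, -1, -1)' with mutable left/right/flag and break,
-- transliterated as descending recursion on the index i; returns the final (left, right).
def getLabelGoA (l : List Char) (i : Nat) (left right : Int) (flag : Bool) : Int × Int :=
  if l.getD i ' ' = '\\' then
    if flag then
      if i = 0 then (left, (i : Int))
      else getLabelGoA l (i - 1) left (i : Int) false
    else ((i : Int) + 1, right)           -- break
  else
    if i = 0 then (left, right)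
    else getLabelGoA l (i - 1) left right flag

def get_label_name (path : String) : String :=
  let l := path.toList
  let res :=
    if l.length = 0 then ((l.length : Int) - 1, (l.length : Int) - 1)   -- empty range: loop body never runs
    else getLabelGoA l (l.length - 1) ((l.length : Int) - 1) ((l.length : Int) - 1) true
  String.ofList (PySem.List.slice l (some res.1) (some res.2))

-- ===== PORT B =====
-- Source B's loop body: state (between, last), both Optional strings (here lists of chars)
def stepB (st : Option (List Char) × Option (List Char)) (ch : Char) :
    Option (List Char) × Option (List Char) :=
  if ch = '\\' then
    ((match st.2 with
      | some l => some l          -- if last is not None: between = last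
      | none => st.1),
     some [])                     -- last = ''
  else
    (st.1,
     match st.2 with
     | some l => some (l ++ [ch]) -- if last is not None: last = last + ch
     | none => none)

def get_label_name_alt (path : String) : String :=
  let res := path.toList.foldl stepB (none, none)
  match res.1 with
  | some b => String.ofList b     -- return between …
  | none => ""                    -- … if between is not None else ''

-- ===== PRECONDITION & SPEC =====
def Spec_get_label_name (path : String) (out : String) : Prop := out = get_label_name_alt path
instance (path : String) (out : String) : Decidable (Spec_get_label_name path out) := by unfold Spec_get_label_name; infer_instance

-- ===== CLAIM (what is proved, stated in full; the proofs are below) =====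
def Claim_equal_get_label_name : Prop := ∀ (path : String), Dom_get_label_name path → Spec_get_label_name path (get_label_name path)

-- ===== LEMMAS AND PROOFS =====

-- index of the last occurrence of c among positions < k (-1 if none): the common
-- characterisation both ports are reduced to
def pyRFindChar (l : List Char) (c : Char) : Nat → Int
  | 0 => -1
  | k + 1 => if l.getD k ' ' = c then (k : Int) else pyRFindChar l c k

theorem pyRFindChar_succ (l : List Char) (c : Char) (k : Nat) :
    pyRFindChar l c (k + 1) = if l.getD k ' ' = c then (k : Int) else pyRFindChar l c k := rfl

-- the result of pyRFindChar is -1 or a natural index < k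
theorem pyRFindChar_cases (l : List Char) (c : Char) :
    ∀ k, pyRFindChar l c k = -1 ∨ ∃ j : Nat, j < k ∧ pyRFindChar l c k = (j : Int) := by
  intro k
  induction k with
  | zero => left; rfl
  | succ k ih =>
    rw [pyRFindChar_succ]
    by_cases h : l.getD k ' ' = c
    · rw [if_pos h]; right; exact ⟨k, Nat.lt_succ_self k, rfl⟩
    · rw [if_neg h]
      rcases ih with h1 | ⟨j, hj, hj2⟩
      · left; exact h1
      · right; exact ⟨j, Nat.lt_succ_of_lt hj, hj2⟩

-- searching below k is unaffected by elements appended at or after k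
theorem pyRFindChar_append (l l2 : List Char) (c : Char) :
    ∀ k, k ≤ l.length → pyRFindChar (l ++ l2) c k = pyRFindChar l c k := by
  intro k
  induction k with
  | zero => intro _; rfl
  | succ k ih =>
    intro hk
    rw [pyRFindChar_succ, pyRFindChar_succ,
        List.getD_append _ _ _ _ (by omega), ih (by omega)]

-- A's loop after the first backslash was seen (flag = 0): it breaks at the next backslash
theorem getLabelGoA_false (l : List Char) (left r0 : Int) :
    ∀ i, getLabelGoA l i left r0 false =
      (if pyRFindChar l '\\' (i + 1) = -1 then left else pyRFindChar l '\\' (i + 1) + 1, r0) := by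
  intro i
  induction i with
  | zero =>
    rw [getLabelGoA, pyRFindChar_succ]
    by_cases h : l.getD 0 ' ' = '\\'
    · rw [if_pos h, if_neg (by decide : ¬(false = true)), if_pos h,
         if_neg (by decide : ¬((0 : Nat) : Int) = -1)]
    · rw [if_neg h, if_pos rfl, if_neg h]; simp [pyRFindChar]
  | succ i ih =>
    rw [getLabelGoA, pyRFindChar_succ]
    by_cases h : l.getD (i + 1) ' ' = '\\'
    · rw [if_pos h, if_neg (by decide : ¬(false = true)), if_pos h,
         if_neg (by omega : ¬((i + 1 : Nat) : Int) = -1)]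
    · rw [if_neg h, if_neg (Nat.succ_ne_zero i), Nat.add_sub_cancel, if_neg h, ih]

-- A's loop with flag = 1: it finds the last backslash r before i+1, then the one before r
theorem getLabelGoA_true (l : List Char) (left right : Int) :
    ∀ i, getLabelGoA l i left right true =
      (if pyRFindChar l '\\' (i + 1) = -1 then (left, right)
       else
         (if pyRFindChar l '\\' (pyRFindChar l '\\' (i + 1)).toNat = -1 then left
          else pyRFindChar l '\\' (pyRFindChar l '\\' (i + 1)).toNat + 1,
          pyRFindChar l '\\' (i + 1))) := by
  intro i
  induction i with
  | zero =>
    rw [getLabelGoA, pyRFindChar_succ]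
    by_cases h : l.getD 0 ' ' = '\\'
    · rw [if_pos h, if_pos rfl, if_pos rfl, if_pos h,
         if_neg (by decide : ¬((0 : Nat) : Int) = -1)]
      simp [pyRFindChar]
    · rw [if_neg h, if_pos rfl, if_neg h]; simp [pyRFindChar]
  | succ i ih =>
    rw [getLabelGoA, pyRFindChar_succ]
    by_cases h : l.getD (i + 1) ' ' = '\\'
    · rw [if_pos h, if_pos rfl, if_neg (Nat.succ_ne_zero i), Nat.add_sub_cancel,
         getLabelGoA_false, if_pos h,
         if_neg (by omega : ¬((i + 1 : Nat) : Int) = -1), Int.toNat_natCast]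
    · rw [if_neg h, if_neg (Nat.succ_ne_zero i), Nat.add_sub_cancel, if_neg h, ih]

-- B's forward fold, characterised through the same rfind indices:
-- `last` is the suffix after the last backslash, `between` the segment between the last two
theorem foldB_char (l : List Char) :
    l.foldl stepB (none, none) =
      (if pyRFindChar l '\\' l.length = -1 then (none, none)
       else
         ((if pyRFindChar l '\\' (pyRFindChar l '\\' l.length).toNat = -1 then none
           else some ((l.take (pyRFindChar l '\\' l.length).toNat).drop
                        ((pyRFindChar l '\\' (pyRFindChar l '\\' l.length).toNat).toNat + 1))),
          some (l.drop ((pyRFindChar l '\\' l.length).toNat + 1)))) := by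
  induction l using List.reverseRecOn with
  | nil => rfl
  | append_singleton l c ih =>
    rw [List.foldl_append, ih]
    have hlen : (l ++ [c]).length = l.length + 1 := by simp
    have hget : (l ++ [c]).getD l.length ' ' = c := by
      simp
    have happ : ∀ k, k ≤ l.length → pyRFindChar (l ++ [c]) '\\' k = pyRFindChar l '\\' k :=
      fun k hk => pyRFindChar_append l [c] '\\' k hk
    rw [hlen, pyRFindChar_succ, hget]
    by_cases hc : c = '\\'
    · rw [if_pos hc, if_neg (by omega : ¬((l.length : Nat) : Int) = -1), Int.toNat_natCast,
          happ l.length le_rfl]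
      have hdropall : (l ++ [c]).drop (l.length + 1) = ([] : List Char) :=
        List.drop_eq_nil_of_le (by simp)
      rcases pyRFindChar_cases l '\\' l.length with hr | ⟨j, hj, hjeq⟩
      · rw [hr, if_pos rfl, if_pos rfl, hdropall]
        simp [stepB, hc]
      · rw [hjeq, if_neg (by omega : ¬((j : Nat) : Int) = -1),
            if_neg (by omega : ¬((j : Nat) : Int) = -1), Int.toNat_natCast, hdropall,
            List.take_append_of_le_length le_rfl, List.take_length]
        simp [stepB, hc]
    · rw [if_neg hc, happ l.length le_rfl]
      rcases pyRFindChar_cases l '\\' l.length with hr | ⟨j, hj, hjeq⟩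
      · rw [hr, if_pos rfl, if_pos rfl]
        simp [stepB, hc]
      · rw [hjeq, if_neg (by omega : ¬((j : Nat) : Int) = -1),
            if_neg (by omega : ¬((j : Nat) : Int) = -1), Int.toNat_natCast,
            happ j (le_of_lt hj),
            List.take_append_of_le_length (le_of_lt hj),
            List.drop_append_of_le_length (by omega)]
        simp [stepB, hc]

-- slice with both bounds non-negative and end ≤ start is empty
theorem slice_empty_of_le (l : List Char) (a b : Int) (ha : 0 ≤ a) (hb : 0 ≤ b) (hba : b ≤ a) :
    PySem.List.slice l (some a) (some b) = [] := by
  rw [PySem.List.slice_toNat l ha hb]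
  have h : b.toNat ≤ a.toNat := Int.toNat_le_toNat hba
  simp [Nat.sub_eq_zero_of_le h]

-- ===== VERDICT (by name: the statement is the Claim_ definition above) =====
theorem get_label_name_spec : Claim_equal_get_label_name := by
  intro path _
  unfold Spec_get_label_name
  simp only [get_label_name, get_label_name_alt]
  rw [foldB_char]
  by_cases hn : path.toList.length = 0
  · have hle : path.toList = [] := List.eq_nil_of_length_eq_zero hn
    rw [hle]
    simp [pyRFindChar, PySem.List.slice]
  · have hpos : 0 < path.toList.length := Nat.pos_of_ne_zero hn
    have hlen : path.toList.length - 1 + 1 = path.toList.length :=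
      Nat.succ_pred_eq_of_pos hpos
    rw [if_neg hn, getLabelGoA_true, hlen]
    rcases pyRFindChar_cases path.toList '\\' path.toList.length with hr | ⟨r, hrlt, hreq⟩
    · rw [hr, if_pos rfl, if_pos rfl]
      rw [slice_empty_of_le path.toList ((path.toList.length : Int) - 1)
            ((path.toList.length : Int) - 1) (by omega) (by omega) le_rfl]
    · rw [hreq, if_neg (by omega : ¬((r : Nat) : Int) = -1),
         if_neg (by omega : ¬((r : Nat) : Int) = -1), Int.toNat_natCast]
      rcases pyRFindChar_cases path.toList '\\' r with h2 | ⟨j, hjlt, hjeq⟩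
      · rw [h2, if_pos rfl, if_pos rfl]
        rw [slice_empty_of_le path.toList ((path.toList.length : Int) - 1) ((r : Nat) : Int)
              (by omega) (by omega) (by omega)]
      · rw [hjeq, if_neg (by omega : ¬((j : Nat) : Int) = -1),
           if_neg (by omega : ¬((j : Nat) : Int) = -1), Int.toNat_natCast]
        have hsl : PySem.List.slice path.toList (some ((j : Int) + 1)) (some ((r : Nat) : Int))
            = (path.toList.take r).drop (j + 1) := by
          rw [PySem.List.slice_toNat path.toList (by omega) (by omega)]
          have h1 : ((j : Int) + 1).toNat = j + 1 := by omega
          have h2 : (((r : Nat) : Int)).toNat = r := by omega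
          rw [h1, h2, List.drop_take]
        rw [hsl]
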